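-- pv_equiv track=rewrite | github.com/bautista-garcia/rv1103 | models/mobilenet/model/create_calibration_dataset.py | get_imagenet_sample_urls
-- ===== SOURCE A (Python) =====
-- def get_imagenet_sample_urls(num_images=100):
--     """Get sample ImageNet image URLs for calibration"""
--     # Sample ImageNet URLs (these are example URLs - in practice you'd use a proper dataset)
--     sample_urls = [
--         "https://upload.wikimedia.org/wikipedia/commons/thumb/3/3a/Cat03.jpg/1200px-Cat03.jpg",
--         "https://upload.wikimedia.org/wikipedia/commons/thumb/4/45/Eopsaltria_australis_-_Mogo_Campground.jpg/1200px-Eopsaltria_australis_-_Mogo_Campground.jpg",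
--         "https://upload.wikimedia.org/wikipedia/commons/thumb/8/8c/Red_Apple.jpg/1200px-Red_Apple.jpg",
--         "https://upload.wikimedia.org/wikipedia/commons/thumb/2/2f/Google_2015_logo.svg/1200px-Google_2015_logo.svg.png",
--         "https://upload.wikimedia.org/wikipedia/commons/thumb/8/87/Arduino_Logo.svg/1200px-Arduino_Logo.svg.png",
--         "https://upload.wikimedia.org/wikipedia/commons/thumb/9/9e/Plus_symbol.svg/1200px-Plus_symbol.svg.png",
--         "https://upload.wikimedia.org/wikipedia/commons/thumb/2/2f/Logo_TVRI_2000.svg/1200px-Logo_TVRI_2000.svg.png",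
--         "https://upload.wikimedia.org/wikipedia/commons/thumb/8/85/Smiley.svg/1200px-Smiley.svg.png",
--         "https://upload.wikimedia.org/wikipedia/commons/thumb/5/53/Wikipedia-logo-en-big.png/1200px-Wikipedia-logo-en-big.png",
--         "https://upload.wikimedia.org/wikipedia/commons/thumb/8/81/Wikimedia-logo.svg/1200px-Wikimedia-logo.svg.png"
--     ]
--
--     # Repeat the sample URLs to reach the desired number
--     repeated_urls = []
--     while len(repeated_urls) < num_images:
--         repeated_urls.extend(sample_urls)
--
--     return repeated_urls[:num_images]
-- ===== SOURCE B (Python) =====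
-- def get_imagenet_sample_urls(num_images=100):
--     """Get sample ImageNet image URLs for calibration (per-element modular indexing)"""
--     sample_urls = [
--         "https://upload.wikimedia.org/wikipedia/commons/thumb/3/3a/Cat03.jpg/1200px-Cat03.jpg",
--         "https://upload.wikimedia.org/wikipedia/commons/thumb/4/45/Eopsaltria_australis_-_Mogo_Campground.jpg/1200px-Eopsaltria_australis_-_Mogo_Campground.jpg",
--         "https://upload.wikimedia.org/wikipedia/commons/thumb/8/8c/Red_Apple.jpg/1200px-Red_Apple.jpg",
--         "https://upload.wikimedia.org/wikipedia/commons/thumb/2/2f/Google_2015_logo.svg/1200px-Google_2015_logo.svg.png",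
--         "https://upload.wikimedia.org/wikipedia/commons/thumb/8/87/Arduino_Logo.svg/1200px-Arduino_Logo.svg.png",
--         "https://upload.wikimedia.org/wikipedia/commons/thumb/9/9e/Plus_symbol.svg/1200px-Plus_symbol.svg.png",
--         "https://upload.wikimedia.org/wikipedia/commons/thumb/2/2f/Logo_TVRI_2000.svg/1200px-Logo_TVRI_2000.svg.png",
--         "https://upload.wikimedia.org/wikipedia/commons/thumb/8/85/Smiley.svg/1200px-Smiley.svg.png",
--         "https://upload.wikimedia.org/wikipedia/commons/thumb/5/53/Wikipedia-logo-en-big.png/1200px-Wikipedia-logo-en-big.png",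
--         "https://upload.wikimedia.org/wikipedia/commons/thumb/8/81/Wikimedia-logo.svg/1200px-Wikimedia-logo.svg.png"
--     ]
--     # Build the result element by element: the i-th output is sample_urls[i % 10].
--     # No tiling, no slicing; range(num_images) is empty for num_images <= 0, matching A.
--     n = len(sample_urls)
--     return [sample_urls[i % n] for i in range(num_images)]
-- ===== Notes on version B (the rewrite author's own statement) =====
-- stated objective: alternative
-- what changed: B constructs the result element by element as [sample_urls[i % 10] for i in range(num_images)], deriving each entry by modular indexing, instead of A's tiling loop that repeatedly extends an accumulator and slices it.
import Mathlib
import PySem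

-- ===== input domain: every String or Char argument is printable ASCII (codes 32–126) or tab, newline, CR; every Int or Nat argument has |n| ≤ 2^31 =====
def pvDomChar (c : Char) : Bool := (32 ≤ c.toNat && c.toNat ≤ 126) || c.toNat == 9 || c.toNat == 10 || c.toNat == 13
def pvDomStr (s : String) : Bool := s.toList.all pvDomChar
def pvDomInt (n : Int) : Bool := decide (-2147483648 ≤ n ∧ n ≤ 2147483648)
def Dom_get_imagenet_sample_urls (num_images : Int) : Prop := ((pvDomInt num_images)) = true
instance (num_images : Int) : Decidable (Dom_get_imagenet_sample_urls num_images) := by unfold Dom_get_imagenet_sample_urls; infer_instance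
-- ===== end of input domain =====

-- B builds the result element by element via modular indexing over range(num_images),
-- instead of A's extend-and-recheck tiling loop plus slice (objective: alternative).


-- ===== PORT A =====
def pvUrls : List String := [
  "https://upload.wikimedia.org/wikipedia/commons/thumb/3/3a/Cat03.jpg/1200px-Cat03.jpg",
  "https://upload.wikimedia.org/wikipedia/commons/thumb/4/45/Eopsaltria_australis_-_Mogo_Campground.jpg/1200px-Eopsaltria_australis_-_Mogo_Campground.jpg",
  "https://upload.wikimedia.org/wikipedia/commons/thumb/8/8c/Red_Apple.jpg/1200px-Red_Apple.jpg",
  "https://upload.wikimedia.org/wikipedia/commons/thumb/2/2f/Google_2015_logo.svg/1200px-Google_2015_logo.svg.png",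
  "https://upload.wikimedia.org/wikipedia/commons/thumb/8/87/Arduino_Logo.svg/1200px-Arduino_Logo.svg.png",
  "https://upload.wikimedia.org/wikipedia/commons/thumb/9/9e/Plus_symbol.svg/1200px-Plus_symbol.svg.png",
  "https://upload.wikimedia.org/wikipedia/commons/thumb/2/2f/Logo_TVRI_2000.svg/1200px-Logo_TVRI_2000.svg.png",
  "https://upload.wikimedia.org/wikipedia/commons/thumb/8/85/Smiley.svg/1200px-Smiley.svg.png",
  "https://upload.wikimedia.org/wikipedia/commons/thumb/5/53/Wikipedia-logo-en-big.png/1200px-Wikipedia-logo-en-big.png",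
  "https://upload.wikimedia.org/wikipedia/commons/thumb/8/81/Wikimedia-logo.svg/1200px-Wikimedia-logo.svg.png"]

-- the 'while len(repeated_urls) < num_images: repeated_urls.extend(sample_urls)' loop
def pvLoopA (num_images : Int) (acc : List String) : List String :=
  if _h : (acc.length : Int) < num_images then pvLoopA num_images (acc ++ pvUrls) else acc
termination_by (num_images - acc.length).toNat
decreasing_by simp [pvUrls]; omega

def get_imagenet_sample_urls (num_images : Int) : List String :=
  PySem.List.slice (pvLoopA num_images []) none (some num_images)

-- ===== PORT B =====
def get_imagenet_sample_urls_alt (num_images : Int) : List String :=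
  -- [sample_urls[i % n] for i in range(num_images)], n = len(sample_urls) = 10.
  -- i % 10 is always in range [0,10), so Python's indexing never raises; the
  -- getD default "" is never used.
  (PySem.List.pyRange 0 num_images 1).map
    (fun i => PySem.List.pyGetD pvUrls (PySem.Int.mod i (pvUrls.length : Int)) "")

-- ===== PRECONDITION & SPEC =====
def Spec_get_imagenet_sample_urls (num_images : Int) (out : List String) : Prop := out = get_imagenet_sample_urls_alt num_images
instance (num_images : Int) (out : List String) : Decidable (Spec_get_imagenet_sample_urls num_images out) := by unfold Spec_get_imagenet_sample_urls; infer_instance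

-- ===== CLAIM (what is proved, stated in full; the proofs are below) =====
def Claim_equal_get_imagenet_sample_urls : Prop := ∀ (num_images : Int), Dom_get_imagenet_sample_urls num_images → Spec_get_imagenet_sample_urls num_images (get_imagenet_sample_urls num_images)

-- ===== LEMMAS AND PROOFS =====

lemma pvUrls_length : pvUrls.length = 10 := by decide

lemma pvRep_length (j : Nat) : ((List.replicate j pvUrls).flatten).length = 10 * j := by
  induction j with
  | zero => simp
  | succ k ih => simp [List.replicate_succ, ih, pvUrls_length]; ring

lemma pvLoopA_step (num_images : Int) (acc : List String)
    (h : (acc.length : Int) < num_images) :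
    pvLoopA num_images acc = pvLoopA num_images (acc ++ pvUrls) := by
  rw [pvLoopA]; simp [h]

lemma pvLoopA_done (num_images : Int) (acc : List String)
    (h : ¬ (acc.length : Int) < num_images) :
    pvLoopA num_images acc = acc := by
  rw [pvLoopA]; simp [h]

lemma pvRep_succ (j : Nat) :
    (List.replicate j pvUrls).flatten ++ pvUrls = (List.replicate (j+1) pvUrls).flatten := by
  induction j with
  | zero => simp
  | succ k ih => simp [List.replicate_succ] at *; simp [ih]

-- A's loop started from j copies ends at K copies, K the least count with 10*K ≥ num_images
lemma pvLoopA_rep (num_images : Int) (K : Nat)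
    (hK : num_images ≤ 10 * K) (hKmin : ∀ j : Nat, j < K → 10 * (j:Int) < num_images) :
    ∀ j : Nat, j ≤ K → pvLoopA num_images ((List.replicate j pvUrls).flatten)
      = (List.replicate K pvUrls).flatten := by
  intro j hj
  induction hK' : K - j generalizing j with
  | zero =>
    have hjK : j = K := by omega
    subst hjK
    apply pvLoopA_done
    rw [pvRep_length]; push_cast; omega
  | succ m ih =>
    have hjlt : j < K := by omega
    have hshort : (((List.replicate j pvUrls).flatten).length : Int) < num_images := by
      rw [pvRep_length]; push_cast
      exact_mod_cast hKmin j hjlt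
    rw [pvLoopA_step _ _ hshort, pvRep_succ]
    exact ih (j+1) (by omega) (by omega)

-- the i-th element of K tiled copies of pvUrls is pvUrls[i % 10]
lemma pvFlat_get? (K i : Nat) (hi : i < 10 * K) :
    ((List.replicate K pvUrls).flatten)[i]? = pvUrls[i % 10]? := by
  induction K generalizing i with
  | zero => omega
  | succ k ih =>
    rw [show (List.replicate (k+1) pvUrls).flatten = pvUrls ++ (List.replicate k pvUrls).flatten
          by simp [List.replicate_succ]]
    by_cases h10 : i < 10
    · rw [List.getElem?_append_left (by rw [pvUrls_length]; omega)]
      rw [Nat.mod_eq_of_lt h10]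
    · rw [List.getElem?_append_right (by rw [pvUrls_length]; omega)]
      rw [pvUrls_length]
      rw [ih (i - 10) (by omega)]
      congr 1
      omega

theorem pv_main (num_images : Int) :
    get_imagenet_sample_urls num_images = get_imagenet_sample_urls_alt num_images := by
  unfold get_imagenet_sample_urls get_imagenet_sample_urls_alt
  by_cases hpos : num_images ≤ 0
  · rw [pvLoopA_done num_images [] (by simp; omega)]
    rw [PySem.List.pyRange_one_eq_nil (by omega)]
    simp [PySem.List.slice]
  · set K : Nat := ((num_images - 1) / 10 + 1).toNat with hKdef
    have hK : num_images ≤ 10 * K := by simp only [hKdef]; omega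
    have hKmin : ∀ j : Nat, j < K → 10 * (j:Int) < num_images := by
      intro j hj; simp only [hKdef] at hj; omega
    rw [show ([] : List String) = (List.replicate 0 pvUrls).flatten by simp]
    rw [pvLoopA_rep num_images K hK hKmin 0 (Nat.zero_le _)]
    rw [PySem.List.slice_to _ (by omega)]
    apply List.ext_getElem?
    intro i
    by_cases hin : i < num_images.toNat
    · have hiK : i < 10 * K := by omega
      rw [List.getElem?_take_of_lt hin]
      rw [pvFlat_get? K i hiK]
      rw [show num_images = ((num_images.toNat : Nat) : Int) by omega]
      rw [PySem.List.getElem?_map_pyRange_zero _ num_images.toNat i hin]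
      rw [show PySem.Int.mod ((i:Nat):Int) ((pvUrls.length:Nat):Int) = (((i % 10 : Nat)):Int) by
        rw [pvUrls_length]; exact_mod_cast PySem.Int.mod_natCast i 10]
      rw [PySem.List.pyGetD_natCast]
      rw [List.getElem?_eq_getElem (by rw [pvUrls_length]; omega)]
      rw [List.getD_eq_getElem _ _ (by rw [pvUrls_length]; omega)]
    · rw [List.getElem?_eq_none, List.getElem?_eq_none]
      · rw [List.length_map, PySem.List.length_pyRange_one]; omega
      · rw [List.length_take]; omega

-- ===== VERDICT (by name: the statement is the Claim_ definition above) =====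
theorem get_imagenet_sample_urls_spec : Claim_equal_get_imagenet_sample_urls := by
  intro n _
  exact pv_main n
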